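-- pv_equiv track=rewrite | github.com/fen-gao/english-phrase-video | batch_run_chunks.py | select_chunks
-- ===== SOURCE A (Python) =====
-- def select_chunks(
--     chunks: list[tuple[str, list[str]]],
--     start: int,
--     end: int | None,
--     titles: list[str] | None,
--     contains: str | None,
-- ) -> list[tuple[int, str, list[str]]]:
--     indexed = [(idx + 1, title, phrases) for idx, (title, phrases) in enumerate(chunks)]
--
--     if start < 1:
--         raise ValueError("--start must be >= 1")
--
--     if end is not None and end < start:
--         raise ValueError("--end must be >= --start")
--
--     filtered = [row for row in indexed if row[0] >= start and (end is None or row[0] <= end)]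
--
--     if titles:
--         title_set = {t.strip().lower() for t in titles}
--         filtered = [row for row in filtered if row[1].lower() in title_set]
--
--     if contains:
--         needle = contains.lower()
--         filtered = [row for row in filtered if needle in row[1].lower()]
--
--     return filtered
-- ===== SOURCE B (Python) =====
-- def select_chunks(
--     chunks: list[tuple[str, list[str]]],
--     start: int,
--     end: int | None,
--     titles: list[str] | None,
--     contains: str | None,
-- ) -> list[tuple[int, str, list[str]]]:
--     if start < 1:
--         raise ValueError("--start must be >= 1")
--     if end is not None and end < start:
--         raise ValueError("--end must be >= --start")
--
--     # The range condition start <= i <= end on 1-based positions is a contiguous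
--     # window of the list, so take it by slicing instead of testing every row.
--     window = chunks[start - 1:] if end is None else chunks[start - 1:end]
--
--     title_set = {t.strip().lower() for t in titles} if titles else None
--     needle = contains.lower() if contains else None
--
--     result = []
--     for i, (title, phrases) in enumerate(window, start):
--         low = title.lower()
--         if title_set is not None and low not in title_set:
--             continue
--         if needle is not None and needle not in low:
--             continue
--         result.append((i, title, phrases))
--     return result
-- ===== Notes on version B (the rewrite author's own statement) =====
-- stated objective: alternative
-- what changed: B takes the contiguous index window [start, end] by slicing the list (computing the 1-based positions arithmetically with enumerate(window, start)) instead of enumerating everything and testing each row's index, and replaces the staged title/substring filter passes with one loop over the window using a precomputed title_set/needle.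
import Mathlib
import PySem

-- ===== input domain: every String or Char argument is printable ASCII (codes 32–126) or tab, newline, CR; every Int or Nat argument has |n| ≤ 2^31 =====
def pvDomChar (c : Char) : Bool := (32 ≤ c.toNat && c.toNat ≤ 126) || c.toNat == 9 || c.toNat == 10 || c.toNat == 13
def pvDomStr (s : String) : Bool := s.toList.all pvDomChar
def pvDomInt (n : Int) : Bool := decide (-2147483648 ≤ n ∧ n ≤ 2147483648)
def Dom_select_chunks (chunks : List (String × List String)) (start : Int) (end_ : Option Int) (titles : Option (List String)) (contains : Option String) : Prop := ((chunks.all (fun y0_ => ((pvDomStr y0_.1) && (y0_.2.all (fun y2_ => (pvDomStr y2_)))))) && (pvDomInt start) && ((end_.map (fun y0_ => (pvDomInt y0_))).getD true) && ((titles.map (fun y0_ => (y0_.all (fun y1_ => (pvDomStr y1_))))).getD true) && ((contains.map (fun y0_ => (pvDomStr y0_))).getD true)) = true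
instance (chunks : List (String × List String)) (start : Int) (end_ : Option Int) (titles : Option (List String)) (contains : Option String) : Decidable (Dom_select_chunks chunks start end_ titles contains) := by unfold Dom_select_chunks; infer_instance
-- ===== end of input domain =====

-- B takes the contiguous index window [start, end] by SLICING the list (no per-row
-- range tests) and runs one loop over the window for the title/substring conditions
-- (objective: alternative decomposition).

-- ===== PORT A =====
-- literal port of A: index with enumerate, then three sequential filter passes
def select_chunks (chunks : List (String × List String)) (start : Int) (end_ : Option Int) (titles : Option (List String)) (contains : Option String) : List (Int × String × List String) :=
  let indexed : List (Int × String × List String) :=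
    (PySem.List.enumerate chunks 0).map (fun p => (p.1 + 1, p.2.1, p.2.2))
  -- 'raise ValueError' branches are excluded by Pre_select_chunks
  let filtered := indexed.filter (fun row =>
    decide (start ≤ row.1) && (match end_ with | none => true | some e => decide (row.1 ≤ e)))
  let filtered :=
    match titles with
    | some ts =>
        if ts.isEmpty then filtered
        else
          let title_set : PySem.Set String :=
            PySem.Set.ofList (ts.map (fun t => PySem.Str.lower (PySem.Str.strip t)))
          filtered.filter (fun row => PySem.Set.contains title_set (PySem.Str.lower row.2.1))
    | none => filtered
  match contains with
  | some c =>
      if c.isEmpty then filtered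
      else
        let needle := PySem.Str.lower c
        filtered.filter (fun row => PySem.Str.isIn needle (PySem.Str.lower row.2.1))
  | none => filtered

-- ===== PORT B =====
-- Source B's loop over the sliced window, carrying the 1-based position i
def selectChunksGo (title_set : Option (PySem.Set String)) (needle : Option String) (i : Int) : List (String × List String) → List (Int × String × List String)
  | [] => []
  | (title, phrases) :: rest =>
      let low := PySem.Str.lower title
      if (match title_set with | some ts => !(PySem.Set.contains ts low) | none => false) then
        selectChunksGo title_set needle (i + 1) rest
      else if (match needle with | some nd => !(PySem.Str.isIn nd low) | none => false) then
        selectChunksGo title_set needle (i + 1) rest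
      else
        (i, title, phrases) :: selectChunksGo title_set needle (i + 1) rest

def select_chunks_alt (chunks : List (String × List String)) (start : Int) (end_ : Option Int) (titles : Option (List String)) (contains : Option String) : List (Int × String × List String) :=
  let window : List (String × List String) :=
    match end_ with
    | none => PySem.List.slice chunks (some (start - 1)) none
    | some e => PySem.List.slice chunks (some (start - 1)) (some e)
  let title_set : Option (PySem.Set String) :=
    match titles with
    | some ts => if ts.isEmpty then none else some (PySem.Set.ofList (ts.map (fun t => PySem.Str.lower (PySem.Str.strip t))))
    | none => none
  let needle : Option String :=
    match contains with
    | some c => if c.isEmpty then none else some (PySem.Str.lower c)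
    | none => none
  selectChunksGo title_set needle start window

-- ===== PRECONDITION & SPEC =====
-- Pre_ excludes exactly the inputs on which A raises ValueError: start < 1, or end given with end < start.
def Pre_select_chunks (chunks : List (String × List String)) (start : Int) (end_ : Option Int) (titles : Option (List String)) (contains : Option String) : Prop :=
  1 ≤ start ∧ start ≤ end_.getD start
instance (chunks : List (String × List String)) (start : Int) (end_ : Option Int) (titles : Option (List String)) (contains : Option String) : Decidable (Pre_select_chunks chunks start end_ titles contains) := by unfold Pre_select_chunks; infer_instance

def pvWitness_select_chunks : (List (String × List String)) × Int × Option Int × Option (List String) × Option String :=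
  ([("Alpha", ["hi"]), ("Beta", [])], 1, some 2, some [" alpha "], some "a")

def Spec_select_chunks (chunks : List (String × List String)) (start : Int) (end_ : Option Int) (titles : Option (List String)) (contains : Option String) (out : List (Int × String × List String)) : Prop := out = select_chunks_alt chunks start end_ titles contains
instance (chunks : List (String × List String)) (start : Int) (end_ : Option Int) (titles : Option (List String)) (contains : Option String) (out : List (Int × String × List String)) : Decidable (Spec_select_chunks chunks start end_ titles contains out) := by unfold Spec_select_chunks; infer_instance

-- ===== CLAIM (what is proved, stated in full; the proofs are below) =====
def Claim_equal_select_chunks : Prop := ∀ (chunks : List (String × List String)) (start : Int) (end_ : Option Int) (titles : Option (List String)) (contains : Option String), Dom_select_chunks chunks start end_ titles contains → Pre_select_chunks chunks start end_ titles contains → Spec_select_chunks chunks start end_ titles contains (select_chunks chunks start end_ titles contains)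

-- ===== LEMMAS AND PROOFS =====
-- the title/needle part of the predicate, on an enumerated row
def pvTN (title_set : Option (PySem.Set String)) (needle : Option String) (row : Int × String × List String) : Bool :=
  (!(match title_set with | some ts => !(PySem.Set.contains ts (PySem.Str.lower row.2.1)) | none => false))
  && (!(match needle with | some nd => !(PySem.Str.isIn nd (PySem.Str.lower row.2.1)) | none => false))

-- B's loop is the title/needle filter of the enumerated window
lemma go_eq_filter (ts : Option (PySem.Set String)) (nd : Option String) :
    ∀ (l : List (String × List String)) (i : Int),
      selectChunksGo ts nd i l = (PySem.List.enumerate l i).filter (pvTN ts nd) := by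
  intro l
  induction l with
  | nil => intro i; simp [selectChunksGo, PySem.List.enumerate_nil]
  | cons x rest ih =>
    intro i
    obtain ⟨title, phrases⟩ := x
    rw [PySem.List.enumerate_cons]
    simp only [List.filter_cons, selectChunksGo, ih]
    rcases ts with _ | s <;> rcases nd with _ | n <;>
      · simp only [pvTN]
        split_ifs <;> simp_all

-- shifting the enumeration start by one
lemma enumerate_shift {α : Type} : ∀ (l : List α) (k : Int),
    (PySem.List.enumerate l k).map (fun p => (p.1 + 1, p.2)) = PySem.List.enumerate l (k + 1) := by
  intro l
  induction l with
  | nil => intro k; simp [PySem.List.enumerate_nil]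
  | cons x rest ih => intro k; rw [PySem.List.enumerate_cons, PySem.List.enumerate_cons, List.map_cons, ih]

-- the contiguous index-range filter of an enumeration is a drop/take window
lemma filter_range_enumerate {α : Type} : ∀ (l : List α) (k : Int) (a b : Nat),
    (PySem.List.enumerate l k).filter
        (fun r => decide (k + a ≤ r.1) && decide (r.1 < k + a + b)) =
      PySem.List.enumerate ((l.drop a).take b) (k + a) := by
  intro l
  induction l with
  | nil => intro k a b; simp [PySem.List.enumerate_nil]
  | cons x rest ih =>
    intro k a b
    rw [PySem.List.enumerate_cons, List.filter_cons]
    match a, b with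
    | 0, 0 =>
      rw [if_neg (by simp)]
      simp only [Nat.cast_zero, add_zero, List.drop_zero, List.take_zero, PySem.List.enumerate_nil]
      refine List.filter_eq_nil_iff.mpr fun r hr => ?_
      obtain ⟨j, hj, rfl⟩ := (PySem.List.mem_enumerate_iff rest (k + 1) r).mp hr
      simp
    | 0, (b+1) =>
      rw [if_pos (by simp)]
      simp only [List.drop_zero, List.take_succ_cons, PySem.List.enumerate_cons, Nat.cast_zero, add_zero]
      congr 1
      have h := ih (k + 1) 0 b
      simp only [Nat.cast_zero, add_zero, List.drop_zero] at h
      rw [← h]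
      refine List.filter_congr fun r hr => ?_
      obtain ⟨j, hj, rfl⟩ := (PySem.List.mem_enumerate_iff rest (k + 1) r).mp hr
      rw [Bool.eq_iff_iff]
      simp
      all_goals omega
    | (a+1), b =>
      rw [if_neg (by simp)]
      simp only [List.drop_succ_cons]
      have h := ih (k + 1) a b
      have harith : k + 1 + (a : Int) = k + ((a : Nat) + 1 : Nat) := by push_cast; ring
      rw [harith] at h
      rw [← h]

-- A's range filter of the enumerated list equals the enumeration of B's sliced window
lemma range_filter_eq_window (chunks : List (String × List String)) (start : Int) (end_ : Option Int)
    (h1 : 1 ≤ start) (h2 : start ≤ end_.getD start) :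
    (PySem.List.enumerate chunks 1).filter
        (fun row => decide (start ≤ row.1) && (match end_ with | none => true | some e => decide (row.1 ≤ e))) =
      PySem.List.enumerate
        (match end_ with
          | none => PySem.List.slice chunks (some (start - 1)) none
          | some e => PySem.List.slice chunks (some (start - 1)) (some e)) start := by
  cases end_ with
  | none =>
    dsimp only
    rw [PySem.List.slice_from chunks (by omega : (0:Int) ≤ start - 1)]
    have hb := filter_range_enumerate chunks 1 (start - 1).toNat chunks.length
    have hs : (1:Int) + ((start - 1).toNat : Int) = start := by omega
    rw [hs] at hb
    rw [List.take_of_length_le (by simp)] at hb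
    rw [← hb]
    refine List.filter_congr fun r hr => ?_
    obtain ⟨j, hj, rfl⟩ := (PySem.List.mem_enumerate_iff chunks 1 r).mp hr
    rw [Bool.eq_iff_iff]
    simp only [Bool.and_eq_true, decide_eq_true_eq, Bool.and_true]
    constructor
    · intro h'; exact ⟨by omega, by omega⟩
    · intro h'; omega
  | some e =>
    simp only [Option.getD] at h2
    dsimp only
    rw [PySem.List.slice_toNat chunks (by omega : (0:Int) ≤ start - 1) (by omega : (0:Int) ≤ e)]
    have hb := filter_range_enumerate chunks 1 (start - 1).toNat (e.toNat - (start - 1).toNat)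
    have hs : (1:Int) + ((start - 1).toNat : Int) = start := by omega
    rw [hs] at hb
    rw [← hb]
    refine List.filter_congr fun r hr => ?_
    obtain ⟨j, hj, rfl⟩ := (PySem.List.mem_enumerate_iff chunks 1 r).mp hr
    rw [Bool.eq_iff_iff]
    simp only [Bool.and_eq_true, decide_eq_true_eq]
    constructor
    · intro h'; constructor <;> omega
    · intro h'; constructor <;> omega

lemma filter_filter' {α : Type} (p q : α → Bool) (l : List α) :
    (l.filter p).filter q = l.filter (fun a => p a && q a) := by
  induction l with
  | nil => rfl
  | cons x xs ih =>
    simp only [List.filter_cons]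
    by_cases hp : p x = true <;> by_cases hq : q x = true <;> simp [hp, hq, ih]

-- ===== VERDICT (by name: the statement is the Claim_ definition above) =====
theorem select_chunks_spec : Claim_equal_select_chunks := by
  intro chunks start end_ titles contains _ hpre
  obtain ⟨h1, h2⟩ := hpre
  unfold Spec_select_chunks select_chunks select_chunks_alt
  simp only
  rw [go_eq_filter]
  have hshift : (PySem.List.enumerate chunks 0).map (fun p => (p.1 + 1, p.2.1, p.2.2)) =
      PySem.List.enumerate chunks 1 := by
    have h := enumerate_shift chunks 0
    simpa using h
  rw [hshift]
  rw [← range_filter_eq_window chunks start end_ h1 h2]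
  cases titles with
  | none =>
    cases contains with
    | none =>
      dsimp only
      simp [pvTN]
    | some c =>
      by_cases hc : c.isEmpty <;>
        · simp only [hc, if_true, if_false, Bool.false_eq_true, filter_filter']
          refine List.filter_congr fun a _ => ?_
          simp [pvTN, Bool.and_assoc]
  | some ts =>
    by_cases hts : ts.isEmpty <;>
    cases contains with
    | none =>
      simp only [hts, if_true, if_false, Bool.false_eq_true, filter_filter']
      refine List.filter_congr fun a _ => ?_
      simp [pvTN, Bool.and_assoc]
    | some c =>
      by_cases hc : c.isEmpty <;>
        · simp only [hts, hc, if_true, if_false, Bool.false_eq_true, filter_filter']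
          refine List.filter_congr fun a _ => ?_
          simp [pvTN, Bool.and_assoc]
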